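-- pv_equiv track=rewrite | github.com/zhaohuanke123/vanko-skill | skills/coding-workflow/scripts/plan_batches.py | assign_batches
-- ===== SOURCE A (Python) =====
-- from typing import Any
--
-- def file_sets_overlap(a: list[str], b: list[str]) -> bool:
--     """Check if two file lists share any path prefix (directory-level overlap)."""
--     set_a = {p.rstrip("/").split("/")[0] if "/" in p else p for p in a}
--     set_b = {p.rstrip("/").split("/")[0] if "/" in p else p for p in b}
--     return bool(set_a & set_b)
--
-- def conflict_group_match(a: dict[str, Any], b: dict[str, Any]) -> bool:
--     """Check if two tasks share a conflict_group."""
--     groups_a = set(a.get("conflict_groups", []))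
--     groups_b = set(b.get("conflict_groups", []))
--     return bool(groups_a & groups_b)
--
-- def has_conflict(a: dict[str, Any], b: dict[str, Any]) -> bool:
--     """Determine if two tasks cannot safely run in parallel."""
--     files_a = a.get("files", [])
--     files_b = b.get("files", [])
--     if files_a and files_b and file_sets_overlap(files_a, files_b):
--         return True
--     if conflict_group_match(a, b):
--         return True
--     return False
--
-- def assign_batches(tasks: list[dict[str, Any]]) -> list[list[dict[str, Any]]]:
--     """
--     Group ready tasks into parallel batches using a greedy algorithm.
--
--     Tasks in the same batch are guaranteed to have no file-level conflicts
--     with each other. Tasks with conflicts are pushed to separate batches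
--     (still parallel, just in different waves).
--     """
--     batches: list[list[dict[str, Any]]] = []
--     remaining = list(tasks)
--
--     while remaining:
--         batch: list[dict[str, Any]] = []
--         deferred: list[dict[str, Any]] = []
--
--         for task in remaining:
--             if any(has_conflict(task, member) for member in batch):
--                 deferred.append(task)
--             else:
--                 batch.append(task)
--
--         if batch:
--             batches.append(batch)
--         if not batch or not deferred:
--             break
--         remaining = deferred
--
--     return batches
-- ===== SOURCE B (Python) =====
-- from typing import Any
--
--
-- def file_sets_overlap(a: list[str], b: list[str]) -> bool:
--     set_a = {p.rstrip("/").split("/")[0] if "/" in p else p for p in a}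
--     set_b = {p.rstrip("/").split("/")[0] if "/" in p else p for p in b}
--     return bool(set_a & set_b)
--
--
-- def conflict_group_match(a: dict[str, Any], b: dict[str, Any]) -> bool:
--     groups_a = set(a.get("conflict_groups", []))
--     groups_b = set(b.get("conflict_groups", []))
--     return bool(groups_a & groups_b)
--
--
-- def has_conflict(a: dict[str, Any], b: dict[str, Any]) -> bool:
--     files_a = a.get("files", [])
--     files_b = b.get("files", [])
--     if files_a and files_b and file_sets_overlap(files_a, files_b):
--         return True
--     if conflict_group_match(a, b):
--         return True
--     return False
--
--
-- def assign_batches(tasks: list[dict[str, Any]]) -> list[list[dict[str, Any]]]: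
--     """Single-pass first-fit: each task joins the first existing batch it does
--     not conflict with, else opens a new batch."""
--     batches: list[list[dict[str, Any]]] = []
--     for task in tasks:
--         for batch in batches:
--             if not any(has_conflict(task, member) for member in batch):
--                 batch.append(task)
--                 break
--         else:
--             batches.append([task])
--     return batches
-- ===== Notes on version B (the rewrite author's own statement) =====
-- stated objective: simpler
-- what changed: Replaced the round-based wave loop (re-scan the remaining tasks each round, collecting a batch and a deferred list) by a single first-fit pass: each task is appended to the first already-created batch containing no conflicting member, otherwise starts a new batch.
import Mathlib
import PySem

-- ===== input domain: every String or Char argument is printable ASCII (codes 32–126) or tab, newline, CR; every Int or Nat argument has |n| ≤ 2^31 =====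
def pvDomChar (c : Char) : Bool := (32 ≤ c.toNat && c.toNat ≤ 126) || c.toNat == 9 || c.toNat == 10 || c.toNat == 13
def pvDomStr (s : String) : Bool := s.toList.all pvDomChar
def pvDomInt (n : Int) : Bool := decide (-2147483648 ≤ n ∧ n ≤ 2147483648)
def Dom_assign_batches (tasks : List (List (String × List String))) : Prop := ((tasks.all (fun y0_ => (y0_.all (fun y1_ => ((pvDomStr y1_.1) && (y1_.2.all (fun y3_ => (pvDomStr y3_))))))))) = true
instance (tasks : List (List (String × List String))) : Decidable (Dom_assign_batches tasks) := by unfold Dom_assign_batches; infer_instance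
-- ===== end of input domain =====

-- B replaces A's round-based wave loop by a single first-fit pass over the tasks (simpler; same conflict checks).


-- a task = one Python dict[str, Any] with list-of-str values, as an association list
abbrev PvTask : Type := List (String × List String)

-- shared-module helpers (used verbatim by both Pythons)

-- p.rstrip("/").split("/")[0] if "/" in p else p — rstrip with a chars argument is ported by hand
-- (drop trailing '/' characters), exact for the single character "/"; split("/") never returns an
-- empty list, so the [0] index never raises and headD is exact.
def pvFilePrefix (p : String) : List Char :=
  if PySem.Str.isIn "/" p then
    (PySem.Chars.splitOn ((p.toList.reverse.dropWhile (· == '/')).reverse) ['/']).headD []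
  else p.toList

def pvFileSetsOverlap (a b : List String) : Bool :=
  let setA := PySem.Set.ofList (a.map pvFilePrefix)
  let setB := PySem.Set.ofList (b.map pvFilePrefix)
  !(PySem.Set.inter setA setB).isEmpty

def pvConflictGroupMatch (a b : PvTask) : Bool :=
  let groupsA := PySem.Set.ofList ((PySem.Dict.mk a).getD "conflict_groups" [])
  let groupsB := PySem.Set.ofList ((PySem.Dict.mk b).getD "conflict_groups" [])
  !(PySem.Set.inter groupsA groupsB).isEmpty

def pvHasConflict (a b : PvTask) : Bool :=
  let filesA := (PySem.Dict.mk a).getD "files" []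
  let filesB := (PySem.Dict.mk b).getD "files" []
  if !filesA.isEmpty && !filesB.isEmpty && pvFileSetsOverlap filesA filesB then true
  else if pvConflictGroupMatch a b then true
  else false

-- any(has_conflict(task, member) for member in batch) — appears in both Pythons
def pvConf (task : PvTask) (batch : List PvTask) : Bool :=
  batch.any (fun member => pvHasConflict task member)

-- ===== PORT A =====
-- the body of A's inner `for task in remaining` loop, state = (batch, deferred)
def pvStepA (st : List PvTask × List PvTask) (task : PvTask) : List PvTask × List PvTask :=
  if pvConf task st.1 then (st.1, st.2 ++ [task]) else (st.1 ++ [task], st.2)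

-- A's `while remaining:` loop; structural recursion on a fuel bounded by the task count
-- (each round defers strictly fewer tasks than remain, so fuel = tasks.length always suffices —
-- proved in whileA_fuel_irrel below; the fuel only makes the same computation total)
def pvWhileA : Nat → List PvTask → List (List PvTask)
  | 0, _ => []
  | _, [] => []
  | fuel + 1, t :: rest =>
    let st := List.foldl pvStepA ([], []) (t :: rest)
    (if !st.1.isEmpty then [st.1] else []) ++
      (if st.1.isEmpty || st.2.isEmpty then [] else pvWhileA fuel st.2)

def assign_batches (tasks : List (List (String × List String))) : List (List (List (String × List String))) :=
  pvWhileA tasks.length tasks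

-- ===== PORT B =====
-- place one task into the first non-conflicting batch, else append a new batch
def pvPlace (task : PvTask) : List (List PvTask) → List (List PvTask)
  | [] => [[task]]
  | b :: bs => if pvConf task b then b :: pvPlace task bs else (b ++ [task]) :: bs

def assign_batches_alt (tasks : List (List (String × List String))) : List (List (List (String × List String))) :=
  tasks.foldl (fun batches task => pvPlace task batches) []

-- ===== PRECONDITION & SPEC =====
def Spec_assign_batches (tasks : List (List (String × List String))) (out : List (List (List (String × List String)))) : Prop := out = assign_batches_alt tasks
instance (tasks : List (List (String × List String))) (out : List (List (List (String × List String)))) : Decidable (Spec_assign_batches tasks out) := by unfold Spec_assign_batches; infer_instance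

-- ===== CLAIM (what is proved, stated in full; the proofs are below) =====
def Claim_equal_assign_batches : Prop := ∀ (tasks : List (List (String × List String))), Dom_assign_batches tasks → Spec_assign_batches tasks (assign_batches tasks)

-- ===== LEMMAS AND PROOFS =====

-- One wave, functionally: pvSift b ts = (b extended by every task that fits, the deferred tasks)
def pvSift (b : List PvTask) : List PvTask → List PvTask × List PvTask
  | [] => (b, [])
  | t :: ts =>
    if pvConf t b then ((pvSift b ts).1, t :: (pvSift b ts).2)
    else pvSift (b ++ [t]) ts

theorem foldl_stepA_eq_sift (ts : List PvTask) (b d : List PvTask) :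
    List.foldl pvStepA (b, d) ts = ((pvSift b ts).1, d ++ (pvSift b ts).2) := by
  induction ts generalizing b d with
  | nil => simp [pvSift]
  | cons t ts ih =>
    simp only [List.foldl_cons, pvStepA, pvSift]
    split
    · rw [ih b (d ++ [t])]; simp
    · rw [ih (b ++ [t]) d]

theorem sift_len (ts : List PvTask) (b : List PvTask) :
    (pvSift b ts).2.length ≤ ts.length := by
  induction ts generalizing b with
  | nil => simp [pvSift]
  | cons t ts ih =>
    simp only [pvSift]
    split
    · have := ih b; simp; omega
    · have := ih (b ++ [t]); simp; omega

theorem sift_fst_ne_nil (ts : List PvTask) (b : List PvTask) (hb : b ≠ []) :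
    (pvSift b ts).1 ≠ [] := by
  induction ts generalizing b with
  | nil => simpa [pvSift]
  | cons t ts ih =>
    simp only [pvSift]
    split
    · exact ih b hb
    · exact ih (b ++ [t]) (by simp)

-- first-fit factorizes through one wave
theorem foldl_place_cons (ts : List PvTask) (b : List PvTask) (bs : List (List PvTask)) :
    List.foldl (fun batches task => pvPlace task batches) (b :: bs) ts =
      (pvSift b ts).1 ::
        List.foldl (fun batches task => pvPlace task batches) bs (pvSift b ts).2 := by
  induction ts generalizing b bs with
  | nil => simp [pvSift]
  | cons t ts ih =>
    simp only [List.foldl_cons, pvPlace, pvSift]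
    split
    · rw [ih b (pvPlace t bs)]; simp
    · rw [ih (b ++ [t]) bs]

theorem whileA_eq_firstFit (n : Nat) (ts : List PvTask) (h : ts.length ≤ n) :
    pvWhileA n ts = List.foldl (fun batches task => pvPlace task batches) [] ts := by
  induction n generalizing ts with
  | zero =>
    have : ts = [] := List.eq_nil_of_length_eq_zero (Nat.le_zero.mp h)
    subst this; simp [pvWhileA]
  | succ n ih =>
    match ts with
    | [] => simp [pvWhileA]
    | t :: rest =>
      have hfold : List.foldl pvStepA (([] : List PvTask), ([] : List PvTask)) (t :: rest)
          = ((pvSift [t] rest).1, (pvSift [t] rest).2) := by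
        simp only [List.foldl_cons, pvStepA, pvConf, List.any_nil]
        simpa using foldl_stepA_eq_sift rest [t] []
      have hne : (pvSift [t] rest).1 ≠ [] := sift_fst_ne_nil rest [t] (by simp)
      have hlen : (pvSift [t] rest).2.length ≤ n := by
        have := sift_len rest [t]; simp at h; omega
      rw [pvWhileA, hfold]
      simp only [List.foldl_cons]
      show (if !(pvSift [t] rest).1.isEmpty then [(pvSift [t] rest).1] else []) ++
          (if (pvSift [t] rest).1.isEmpty || (pvSift [t] rest).2.isEmpty then []
            else pvWhileA n (pvSift [t] rest).2) = _
      rw [show pvPlace t [] = [[t]] from rfl, foldl_place_cons]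
      by_cases hd : (pvSift [t] rest).2 = []
      · simp [hd, hne]
      · rw [ih _ hlen]
        simp [hne, hd]

-- ===== VERDICT (by name: the statement is the Claim_ definition above) =====
theorem assign_batches_spec : Claim_equal_assign_batches := by
  intro tasks _
  unfold Spec_assign_batches assign_batches assign_batches_alt
  exact whileA_eq_firstFit tasks.length tasks le_rfl
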